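-- pv_equiv track=rewrite | github.com/avichalk/csc_120 | Long Projects/3/word_search.py | find_em_sideways
-- ===== SOURCE A (Python) =====
-- def find_em_sideways(words_list, grid_list):
--     '''
--     '''
--     new_grid_list = []
--     for i in grid_list:
--         new_grid_list.append(i)
--     i = 0
--     words = []
--     while i < len(words_list):
--         j = 0
--         while j < len(new_grid_list):
--             if words_list[i] in new_grid_list[j]:
--                 #print_em_sideways(words_list, new_grid_list, j, i)
--                 words.append((i, j))
--             j+=1
--         i+=1
--     return words
-- ===== SOURCE B (Python) =====
-- def find_em_sideways(words_list, grid_list):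
--     '''
--     '''
--     # Memoise, per distinct word, the list of rows containing it, so duplicate
--     # words never rescan the grid; emit word-major straight from the index.
--     rows_for = {}
--     out = []
--     for i, word in enumerate(words_list):
--         if word not in rows_for:
--             rows_for[word] = [j for j, row in enumerate(grid_list) if word in row]
--         for j in rows_for[word]:
--             out.append((i, j))
--     return out
-- ===== Notes on version B (the rewrite author's own statement) =====
-- stated objective: faster
-- what changed: B builds a dict memoising, per distinct word, the list of grid rows containing it (computed by one enumerate scan on first sight) and emits pairs from that index, instead of A's nested index while-loops (plus grid copy) that rescan every row for every word occurrence.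
import Mathlib
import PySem

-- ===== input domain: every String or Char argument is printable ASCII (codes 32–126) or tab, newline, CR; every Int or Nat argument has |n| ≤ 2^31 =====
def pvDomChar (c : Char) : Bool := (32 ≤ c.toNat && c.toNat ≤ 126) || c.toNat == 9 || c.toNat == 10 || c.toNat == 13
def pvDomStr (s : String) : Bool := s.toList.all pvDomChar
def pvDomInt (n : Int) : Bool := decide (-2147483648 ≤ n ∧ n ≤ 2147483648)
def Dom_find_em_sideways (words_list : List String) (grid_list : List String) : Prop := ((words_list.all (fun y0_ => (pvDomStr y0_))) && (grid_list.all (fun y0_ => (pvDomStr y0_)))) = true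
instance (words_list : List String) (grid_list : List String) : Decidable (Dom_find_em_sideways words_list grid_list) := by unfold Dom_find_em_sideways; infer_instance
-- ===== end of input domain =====

-- B memoises, per distinct word, the list of grid rows containing it (a dict built during one word-major pass), so duplicate words never rescan the grid; A rescans every row for every word occurrence.

-- ===== PORT A =====
-- A's while loops run i/j from 0 below the lengths, so every index is in range and getD is exact there
def find_em_sideways (words_list : List String) (grid_list : List String) : List (Int × Int) :=
  let new_grid_list := grid_list.foldl (fun acc i => acc ++ [i]) []
  (List.range words_list.length).foldl (fun words i =>
    (List.range new_grid_list.length).foldl (fun words j =>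
      if PySem.Str.isIn (words_list.getD i "") (new_grid_list.getD j "") then words ++ [((i : Int), (j : Int))] else words) words) []

-- ===== PORT B =====
-- rows_for[word] is read only after the branch guaranteed the key is present, so getD [] is exact there;
-- the state is the pair (rows_for, out) threaded through the word loop
def find_em_sideways_alt (words_list : List String) (grid_list : List String) : List (Int × Int) :=
  let st := (PySem.List.enumerate words_list).foldl
    (fun (st : PySem.Dict String (List Int) × List (Int × Int)) q =>
      let d := if (PySem.Dict.contains st.1 q.2) = false
               then PySem.Dict.insert st.1 q.2
                 (((PySem.List.enumerate grid_list).filter (fun p => PySem.Str.isIn q.2 p.2)).map (fun p => p.1))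
               else st.1
      let out := (PySem.Dict.getD d q.2 []).foldl (fun acc j => acc ++ [(q.1, j)]) st.2
      (d, out))
    (PySem.Dict.empty, [])
  st.2

-- ===== PRECONDITION & SPEC =====
def Spec_find_em_sideways (words_list : List String) (grid_list : List String) (out : List (Int × Int)) : Prop := out = find_em_sideways_alt words_list grid_list
instance (words_list : List String) (grid_list : List String) (out : List (Int × Int)) : Decidable (Spec_find_em_sideways words_list grid_list out) := by unfold Spec_find_em_sideways; infer_instance

-- ===== CLAIM (what is proved, stated in full; the proofs are below) =====
def Claim_equal_find_em_sideways : Prop := ∀ (words_list : List String) (grid_list : List String), Dom_find_em_sideways words_list grid_list → Spec_find_em_sideways words_list grid_list (find_em_sideways words_list grid_list)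

-- ===== LEMMAS AND PROOFS =====

/-- One hit cell: `[(i,j)]` if word `i` occurs in row `j`, else `[]`. -/
def pvG (w g : List String) (i j : Nat) : List (Int × Int) :=
  if PySem.Str.isIn (w.getD i "") (g.getD j "") then [((i : Int), (j : Int))] else []

/-- A's result in canonical word-major form. -/
def pvCA (w g : List String) : List (Int × Int) :=
  (List.range w.length).flatMap (fun i => (List.range g.length).flatMap (fun j => pvG w g i j))

/-- The rows of `g` containing `word`, as B's comprehension computes them. -/
def pvRows (g : List String) (word : String) : List Int :=
  ((List.range g.length).filter (fun j => PySem.Str.isIn word (g.getD j ""))).map (fun (j : Nat) => (j : Int))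

lemma pvA_eq_CA (w g : List String) : find_em_sideways w g = pvCA w g := by
  unfold find_em_sideways pvCA
  simp only [PySem.List.foldl_append_singleton_eq_self, List.nil_append]
  have hin : ∀ (acc : List (Int × Int)) (i : Nat),
      (List.range g.length).foldl (fun words j =>
        if PySem.Str.isIn (w.getD i "") (g.getD j "") then words ++ [((i : Int), (j : Int))] else words) acc
      = acc ++ (List.range g.length).flatMap (fun j => pvG w g i j) := by
    intro acc i
    have hfun : (fun (words : List (Int × Int)) (j : Nat) =>
        if PySem.Str.isIn (w.getD i "") (g.getD j "") then words ++ [((i : Int), (j : Int))] else words)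
        = fun words j => words ++ pvG w g i j := by
      funext words j
      unfold pvG
      split <;> simp
    rw [hfun, PySem.List.foldl_append_eq_flatMap]
  simp only [hin]
  rw [PySem.List.foldl_append_eq_flatMap]
  simp

lemma pvEnum_eq (xs : List String) :
    PySem.List.enumerate xs = (List.range xs.length).map (fun (k : Nat) => ((k : Int), xs.getD k "")) := by
  rw [PySem.List.enumerate_eq_map_pyRange xs "", show PySem.List.len xs = ((xs.length : Nat) : Int) from rfl,
    PySem.List.pyRange_zero_natCast, List.map_map]
  exact List.map_congr_left fun k hk => by simp [PySem.List.pyGetD_natCast]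

lemma pvFilterEnum (g : List String) (word : String) :
    ((PySem.List.enumerate g).filter (fun p => PySem.Str.isIn word p.2)).map (fun p => p.1)
      = pvRows g word := by
  rw [pvEnum_eq g, List.filter_map, List.map_map]
  rfl

/-- The memo invariant: every cached list is the true row list of its word. -/
def pvInv (g : List String) (d : PySem.Dict String (List Int)) : Prop :=
  ∀ word l, d.get? word = some l → l = pvRows g word

/-- B's loop body, on a plain word index. -/
def pvStep (w g : List String) (st : PySem.Dict String (List Int) × List (Int × Int)) (i : Nat) :
    PySem.Dict String (List Int) × List (Int × Int) :=
  let d := if (PySem.Dict.contains st.1 (w.getD i "")) = false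
           then PySem.Dict.insert st.1 (w.getD i "")
             (((PySem.List.enumerate g).filter (fun p => PySem.Str.isIn (w.getD i "") p.2)).map (fun p => p.1))
           else st.1
  let out := (PySem.Dict.getD d (w.getD i "") []).foldl (fun acc j => acc ++ [(((i : Nat) : Int), j)]) st.2
  (d, out)

lemma pvStep_d (w g : List String) (st : PySem.Dict String (List Int) × List (Int × Int)) (i : Nat)
    (hInv : pvInv g st.1) :
    pvInv g (pvStep w g st i).1 ∧
      PySem.Dict.getD (pvStep w g st i).1 (w.getD i "") [] = pvRows g (w.getD i "") := by
  unfold pvStep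
  simp only [pvFilterEnum]
  set word := w.getD i ""
  by_cases h : PySem.Dict.contains st.1 word = false
  · rw [if_pos h]
    refine ⟨?_, PySem.Dict.getD_insert_self _ _ _ _⟩
    intro word' l hget
    rw [PySem.Dict.get?_insert] at hget
    split at hget
    · cases hget; next heq => subst heq; simp_all
    · exact hInv _ _ hget
  · rw [if_neg h]
    refine ⟨hInv, ?_⟩
    have hc : (PySem.Dict.get? st.1 word).isSome := by
      rw [← PySem.Dict.contains_eq_isSome_get?]
      simpa using h
    obtain ⟨l, hl⟩ := Option.isSome_iff_exists.mp hc
    rw [PySem.Dict.getD_eq_get?_getD, hl, hInv _ _ hl]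
    rfl

lemma pvFold (w g : List String) (is : List Nat) (d : PySem.Dict String (List Int))
    (out : List (Int × Int)) (hInv : pvInv g d) :
    (is.foldl (pvStep w g) (d, out)).2
      = out ++ is.flatMap (fun i => (pvRows g (w.getD i "")).map (fun j => (((i : Nat) : Int), j)))
    ∧ pvInv g (is.foldl (pvStep w g) (d, out)).1 := by
  induction is generalizing d out with
  | nil => simp [hInv]
  | cons i t ih =>
    obtain ⟨h1, h2⟩ := pvStep_d w g (d, out) i hInv
    have hout : (pvStep w g (d, out) i).2
        = out ++ (pvRows g (w.getD i "")).map (fun j => (((i : Nat) : Int), j)) := by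
      show (PySem.Dict.getD (pvStep w g (d, out) i).1 (w.getD i "") []).foldl _ out = _
      rw [h2, PySem.List.foldl_append_singleton_eq_map]
    have hstep : pvStep w g (d, out) i
        = ((pvStep w g (d, out) i).1,
           out ++ (pvRows g (w.getD i "")).map (fun j => (((i : Nat) : Int), j))) := by
      rw [← hout]
    obtain ⟨e1, e2⟩ := ih (pvStep w g (d, out) i).1
      (out ++ (pvRows g (w.getD i "")).map (fun j => (((i : Nat) : Int), j))) h1
    rw [List.foldl_cons, hstep]
    exact ⟨by rw [e1]; simp, e2⟩

lemma pvB_eq (w g : List String) :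
    find_em_sideways_alt w g = ((List.range w.length).foldl (pvStep w g) (PySem.Dict.empty, [])).2 := by
  unfold find_em_sideways_alt
  rw [pvEnum_eq w, List.foldl_map]
  rfl

lemma pvInner (w g : List String) (i : Nat) :
    (List.range g.length).flatMap (fun j => pvG w g i j)
      = (pvRows g (w.getD i "")).map (fun j => (((i : Nat) : Int), j)) := by
  unfold pvRows
  rw [List.map_map]
  induction (List.range g.length) with
  | nil => simp
  | cons j t ih =>
    rw [List.flatMap_cons, ih, List.filter_cons]
    unfold pvG
    by_cases h : PySem.Str.isIn (w.getD i "") (g.getD j "") = true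
    · simp only [if_pos h]
      simp
    · simp only [if_neg h]
      simp

-- ===== VERDICT (by name: the statement is the Claim_ definition above) =====
theorem find_em_sideways_spec : Claim_equal_find_em_sideways := by
  intro w g _
  show find_em_sideways w g = find_em_sideways_alt w g
  rw [pvA_eq_CA, pvB_eq]
  have hInv0 : pvInv g PySem.Dict.empty := by
    intro word l h
    rw [PySem.Dict.get?_empty] at h
    cases h
  rw [(pvFold w g (List.range w.length) PySem.Dict.empty [] hInv0).1]
  unfold pvCA
  simp only [pvInner, List.nil_append]
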